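-- pv_equiv track=rewrite | github.com/knowledgetechnologyuhh/gasp | gazenet/utils/helpers.py | adjust_len
-- ===== SOURCE A (Python) =====
-- def adjust_len(a, b):
--     # adjusts the len of two sorted lists
--     al = len(a)
--     bl = len(b)
--     if al > bl:
--         start = (al - bl) // 2
--         end = bl + start
--         a = a[start:end]
--     if bl > al:
--         a, b = adjust_len(b, a)
--     return a, b
-- ===== SOURCE B (Python) =====
-- def adjust_len(a, b):
--     # Non-recursive: handle both asymmetry directions with symmetric branches.
--     al = len(a)
--     bl = len(b)
--     if al > bl:
--         start = (al - bl) // 2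
--         return a[start:start + bl], b
--     if bl > al:
--         start = (bl - al) // 2
--         return b[start:start + al], a
--     return a, b
-- ===== Notes on version B (the rewrite author's own statement) =====
-- stated objective: simpler
-- what changed: Replaced the swap-and-recurse self-call with a flat non-recursive conditional that slices whichever list is longer directly (returning trimmed-longer first, shorter second, as A does).
import Mathlib
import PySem

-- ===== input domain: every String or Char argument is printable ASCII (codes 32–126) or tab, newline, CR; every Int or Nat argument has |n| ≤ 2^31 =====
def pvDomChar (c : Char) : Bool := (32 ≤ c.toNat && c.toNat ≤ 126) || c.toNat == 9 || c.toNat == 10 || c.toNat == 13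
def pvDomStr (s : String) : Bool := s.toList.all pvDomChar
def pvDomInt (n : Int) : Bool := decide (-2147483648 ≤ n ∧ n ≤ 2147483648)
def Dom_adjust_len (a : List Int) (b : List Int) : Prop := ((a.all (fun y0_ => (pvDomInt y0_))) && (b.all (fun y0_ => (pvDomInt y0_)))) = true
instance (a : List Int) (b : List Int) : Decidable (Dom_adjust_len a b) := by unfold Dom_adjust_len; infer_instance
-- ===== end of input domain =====

-- B replaces A's swap-and-recurse self-call with a flat symmetric conditional (simpler); return value only.

-- ===== PORT A =====
def adjust_len (a : List Int) (b : List Int) : List Int × List Int :=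
  let al : Int := a.length
  let bl : Int := b.length
  let a' := if al > bl then
      PySem.List.slice a (PySem.Int.floordiv (al - bl) 2) (bl + PySem.Int.floordiv (al - bl) 2)
    else a
  if bl > al then adjust_len b a' else (a', b)
termination_by b.length - a.length
decreasing_by
  simp only [gt_iff_lt] at *
  simp only [dif_neg (by omega : ¬ ((b.length : Int) < (a.length : Int)))]
  omega

-- ===== PORT B =====
def adjust_len_alt (a : List Int) (b : List Int) : List Int × List Int :=
  let al : Int := a.length
  let bl : Int := b.length
  if al > bl then
    let start := PySem.Int.floordiv (al - bl) 2
    (PySem.List.slice a start (start + bl), b)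
  else if bl > al then
    let start := PySem.Int.floordiv (bl - al) 2
    (PySem.List.slice b start (start + al), a)
  else (a, b)

-- ===== PRECONDITION & SPEC =====
def Spec_adjust_len (a : List Int) (b : List Int) (out : List Int × List Int) : Prop := out = adjust_len_alt a b
instance (a : List Int) (b : List Int) (out : List Int × List Int) : Decidable (Spec_adjust_len a b out) := by unfold Spec_adjust_len; infer_instance

-- ===== CLAIM (what is proved, stated in full; the proofs are below) =====
def Claim_equal_adjust_len : Prop := ∀ (a : List Int) (b : List Int), Dom_adjust_len a b → Spec_adjust_len a b (adjust_len a b)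

-- ===== LEMMAS AND PROOFS =====
theorem adjust_len_eq_alt (a b : List Int) : adjust_len a b = adjust_len_alt a b := by
  rw [adjust_len.eq_def]; simp only []; rw [adjust_len.eq_def]; simp only []
  unfold adjust_len_alt
  simp only [gt_iff_lt]
  split_ifs <;> try rfl
  all_goals first | omega | rw [add_comm]


-- ===== VERDICT (by name: the statement is the Claim_ definition above) =====
theorem adjust_len_spec : Claim_equal_adjust_len := by
  intro a b _
  unfold Spec_adjust_len
  exact adjust_len_eq_alt a b
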